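-- pv_equiv track=rewrite | github.com/HBinhCT/Q-project | hackerrank/Algorithms/Stone Division, Revisited/solution.py | stoneDivision
-- ===== SOURCE A (Python) =====
-- def stoneDivision(n, s):
--     from functools import lru_cache
--
--     @lru_cache(maxsize=None)
--     def moves(size):
--         next_moves = [0]
--         for i in s:
--             if size > i and size % i == 0:
--                 next_moves.append(1 + size // i * moves(i))
--         return max(next_moves)
--
--     return moves(n)
-- ===== SOURCE B (Python) =====
-- def stoneDivision(n, s):
--     # Bottom-up DP instead of top-down memoized recursion: the only pile sizes the
--     # game can ever reach are divisors of n, so tabulate just those, in ascending order.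
--     vals = sorted(set(i for i in s if i < n and n % i == 0))
--     dp = {}
--     for x in vals:
--         best = 0
--         for i in s:
--             if x > i and x % i == 0:
--                 best = max(best, 1 + x // i * dp[i])
--         dp[x] = best
--     best = 0
--     for i in s:
--         if n > i and n % i == 0:
--             best = max(best, 1 + n // i * dp[i])
--     return best
-- ===== Notes on version B (the rewrite author's own statement) =====
-- stated objective: alternative
-- what changed: Top-down lru_cache-memoized recursion is replaced by a bottom-up DP: the sorted distinct pile sizes that are proper divisors of n (the only reachable sizes) are tabulated in ascending order into a dict, then the answer for n is read off by one more pass over s.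
import Mathlib
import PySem

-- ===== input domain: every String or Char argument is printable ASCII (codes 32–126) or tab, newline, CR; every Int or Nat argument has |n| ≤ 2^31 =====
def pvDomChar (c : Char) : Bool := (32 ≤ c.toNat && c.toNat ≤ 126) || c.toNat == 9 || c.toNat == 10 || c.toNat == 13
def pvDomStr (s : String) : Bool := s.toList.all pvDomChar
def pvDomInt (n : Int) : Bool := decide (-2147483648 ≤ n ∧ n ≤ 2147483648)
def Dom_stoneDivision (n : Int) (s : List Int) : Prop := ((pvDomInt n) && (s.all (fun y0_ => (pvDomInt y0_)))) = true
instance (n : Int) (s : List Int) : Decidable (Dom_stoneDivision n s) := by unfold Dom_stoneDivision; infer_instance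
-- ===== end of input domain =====

-- B replaces A's top-down memoized recursion by a bottom-up DP over the sorted distinct
-- pile sizes below n that divide n — the only sizes the game can reach (objective:
-- an alternative decomposition with the same exact result).

-- ===== PORT A =====
-- termination helper for the recursion of A's `moves` (cited by decreasing_by below)
theorem pvFilterLtLen (s : List Int) (i size : Int) (hi : i ∈ s) (hlt : i < size) :
    (s.filter (fun x => decide (x < i))).length < (s.filter (fun x => decide (x < size))).length := by
  have mono : ∀ (l : List Int),
      (l.filter (fun x => decide (x < i))).length ≤ (l.filter (fun x => decide (x < size))).length := by
    intro l
    induction l with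
    | nil => simp
    | cons a t ih => by_cases ha : a < i <;> by_cases hb : a < size <;> simp [ha, hb] <;> omega
  obtain ⟨s1, s2, rfl⟩ := List.append_of_mem hi
  have h1 := mono s1
  have h2 := mono s2
  simp only [List.filter_append, List.filter_cons, List.length_append, decide_eq_true_eq,
    lt_irrefl, if_false, hlt, if_true, List.length_cons]
  omega

mutual
-- `moves(size)`: builds next_moves = contributions after the initial 0, then takes the max.
def movesA (s : List Int) (size : Int) : Int :=
  List.foldl max 0 (movesNextA s size s (fun _ h => h))
termination_by ((s.filter (fun x => decide (x < size))).length, s.length + 1)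

-- the `for i in s: if size > i and size % i == 0: next_moves.append(1 + size // i * moves(i))` loop
def movesNextA (s : List Int) (size : Int) (rem : List Int) (h : rem ⊆ s) : List Int :=
  match rem with
  | [] => []
  | i :: rest =>
    if hc : i < size ∧ PySem.Int.mod size i = 0 then
      (1 + PySem.Int.floordiv size i * movesA s i) ::
        movesNextA s size rest (fun a ha => h (List.mem_cons_of_mem i ha))
    else
      movesNextA s size rest (fun a ha => h (List.mem_cons_of_mem i ha))
termination_by ((s.filter (fun x => decide (x < size))).length, rem.length)
decreasing_by
  · exact Prod.Lex.left _ _ (pvFilterLtLen s i size (h (List.mem_cons_self)) hc.1)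
  · exact Prod.Lex.right _ (Nat.lt_succ_self _)
  · exact Prod.Lex.right _ (Nat.lt_succ_self _)
end

def stoneDivision (n : Int) (s : List Int) : Int := movesA s n

-- ===== PORT B =====
-- the inner `for i in s: if x > i and x % i == 0: best = max(best, 1 + x // i * dp[i])` loop of Source B
def altStep (s : List Int) (dp : PySem.Dict Int Int) (x : Int) : Int :=
  s.foldl (fun best i =>
    if i < x ∧ PySem.Int.mod x i = 0 then
      max best (1 + PySem.Int.floordiv x i * dp.getD i 0)
    else best) 0

def stoneDivision_alt (n : Int) (s : List Int) : Int :=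
  let vals := PySem.List.sorted (PySem.Set.ofList (s.filter (fun i => decide (i < n ∧ PySem.Int.mod n i = 0)))) (fun x => x)
  let dp := vals.foldl (fun d x => d.insert x (altStep s d x)) PySem.Dict.empty
  altStep s dp n

-- ===== PRECONDITION & SPEC =====
-- Pre_ excludes exactly the inputs on which A raises ZeroDivisionError (0 ∈ s and n > 0:
-- some reached size is positive, so the guard `size > 0` passes and `size % 0` raises).
def Pre_stoneDivision (n : Int) (s : List Int) : Prop := ¬ ((0 : Int) ∈ s ∧ 0 < n)
instance (n : Int) (s : List Int) : Decidable (Pre_stoneDivision n s) := by unfold Pre_stoneDivision; infer_instance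
def pvWitness_stoneDivision : Int × List Int := (12, [2, 3, 4, 6])

def Spec_stoneDivision (n : Int) (s : List Int) (out : Int) : Prop := out = stoneDivision_alt n s
instance (n : Int) (s : List Int) (out : Int) : Decidable (Spec_stoneDivision n s out) := by unfold Spec_stoneDivision; infer_instance

-- ===== CLAIM (what is proved, stated in full; the proofs are below) =====
def Claim_equal_stoneDivision : Prop := ∀ (n : Int) (s : List Int), Dom_stoneDivision n s → Pre_stoneDivision n s → Spec_stoneDivision n s (stoneDivision n s)

-- ===== LEMMAS AND PROOFS =====

-- A's inner loop (contribution list, then running max) equals B's inner loop (running max with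
-- dict lookups), provided the dict already stores moves for every divisor it will look up.
theorem pvStep (s : List Int) (x : Int) (dp : PySem.Dict Int Int)
    (look : ∀ i ∈ s, i < x → PySem.Int.mod x i = 0 → dp.getD i 0 = movesA s i) :
    ∀ (rem : List Int) (h : rem ⊆ s) (b : Int),
      List.foldl max b (movesNextA s x rem h) =
      rem.foldl (fun best i =>
        if i < x ∧ PySem.Int.mod x i = 0 then
          max best (1 + PySem.Int.floordiv x i * dp.getD i 0)
        else best) b := by
  intro rem
  induction rem with
  | nil => intro h b; rw [movesNextA]; rfl
  | cons i rest ih =>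
    intro h b
    rw [movesNextA]
    by_cases hc : i < x ∧ PySem.Int.mod x i = 0
    · rw [dif_pos hc]
      simp only [List.foldl_cons, if_pos hc]
      rw [look i (h List.mem_cons_self) hc.1 hc.2]
      exact ih _ _
    · rw [dif_neg hc]
      simp only [List.foldl_cons, if_neg hc]
      exact ih _ _

theorem pvAltStepEq (s : List Int) (x : Int) (dp : PySem.Dict Int Int)
    (look : ∀ i ∈ s, i < x → PySem.Int.mod x i = 0 → dp.getD i 0 = movesA s i) :
    altStep s dp x = movesA s x := by
  rw [movesA, altStep, pvStep s x dp look s (fun _ h => h) 0]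

-- invariant of B's dict-building loop: processing the remaining (strictly increasing) values l,
-- a dict that is already correct on every i ∈ s, i < n outside l ends up correct everywhere.
theorem pvDpLoop (s : List Int) (n : Int) :
    ∀ (l : List Int) (dp : PySem.Dict Int Int),
      l.Pairwise (· < ·) →
      (∀ x ∈ l, x ∈ s ∧ x < n ∧ PySem.Int.mod n x = 0) →
      (∀ i ∈ s, i < n → PySem.Int.mod n i = 0 → i ∉ l → dp.getD i 0 = movesA s i) →
      ∀ i ∈ s, i < n → PySem.Int.mod n i = 0 →
        (l.foldl (fun d x => d.insert x (altStep s d x)) dp).getD i 0 = movesA s i := by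
  intro l
  induction l with
  | nil => intro dp _ _ hdp i hi hin hidvd; exact hdp i hi hin hidvd (List.not_mem_nil)
  | cons x rest ih =>
    intro dp hpw hmem hdp i hi hin hidvd
    have hx := hmem x List.mem_cons_self
    have hrest : ∀ y ∈ rest, x < y := (List.pairwise_cons.mp hpw).1
    have hstep : altStep s dp x = movesA s x := by
      apply pvAltStepEq
      intro j hj hjx hjmod
      have hjn : PySem.Int.mod n j = 0 := (PySem.Int.mod_eq_zero_iff_dvd n j).mpr
        (dvd_trans ((PySem.Int.mod_eq_zero_iff_dvd x j).mp hjmod)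
          ((PySem.Int.mod_eq_zero_iff_dvd n x).mp hx.2.2))
      apply hdp j hj (lt_trans hjx hx.2.1) hjn
      intro hjl
      rcases List.mem_cons.mp hjl with rfl | hjr
      · exact lt_irrefl j hjx
      · exact lt_irrefl j (lt_trans hjx (hrest j hjr))
    simp only [List.foldl_cons]
    apply ih _ (List.pairwise_cons.mp hpw).2 (fun y hy => hmem y (List.mem_cons_of_mem x hy))
      _ i hi hin hidvd
    intro j hj hjn hjdvd hjrest
    by_cases hje : j = x
    · subst hje
      rw [PySem.Dict.getD_eq_get?_getD, PySem.Dict.get?_insert_self, Option.getD_some, hstep]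
    · rw [PySem.Dict.getD_eq_get?_getD, PySem.Dict.get?_insert_of_ne dp _ hje,
        ← PySem.Dict.getD_eq_get?_getD]
      exact hdp j hj hjn hjdvd (by simp [hje, hjrest])

-- ===== VERDICT (by name: the statement is the Claim_ definition above) =====
theorem stoneDivision_spec : Claim_equal_stoneDivision := by
  intro n s _ _
  unfold Spec_stoneDivision stoneDivision stoneDivision_alt
  apply Eq.symm
  apply pvAltStepEq
  intro i hi hin hidvd
  apply pvDpLoop s n _ _ (PySem.List.sorted_ofList_pairwise_lt _)
  · intro x hx
    have := (PySem.Set.mem_ofList _ _).mp ((PySem.List.mem_sorted _ _ _ _).mp hx)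
    have h2 := List.mem_filter.mp this
    exact ⟨h2.1, by simpa using h2.2⟩
  · intro j hj hjn hjdvd hjl
    exfalso
    exact hjl ((PySem.List.mem_sorted _ _ _ _).mpr
      ((PySem.Set.mem_ofList _ _).mpr (List.mem_filter.mpr ⟨hj, by simp [hjn, hjdvd]⟩)))
  · exact hi
  · exact hin
  · exact hidvd
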